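-- pv_equiv track=rewrite | github.com/belablotski/heap | rain_water.py | count_level
-- ===== SOURCE A (Python) =====
-- def count_level(heights, level):
--     if level == 0 or level > max(heights):
--         return 0
--     else:
--         total = count = 0
--         first_wall_found = False
--         for h in heights:
--             if h >= level:
--                 if not first_wall_found:
--                     first_wall_found = True
--                 else:
--                     total += count
--                 count = 0
--             else:
--                 count += 1
--     return total
-- ===== SOURCE B (Python) =====
-- def count_level(heights, level):
--     # Guard kept as in A: max(heights) raises ValueError on empty input.
--     if level == 0 or level > max(heights):
--         return 0
--     lead = 0
--     for h in heights:
--         if h >= level: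
--             break
--         lead += 1
--     trail = 0
--     for h in reversed(heights):
--         if h >= level:
--             break
--         trail += 1
--     return sum(1 for h in heights[lead + 1:len(heights) - 1 - trail] if h < level)
-- ===== Notes on version B (the rewrite author's own statement) =====
-- stated objective: alternative
-- what changed: Replaces A's single-pass state machine (wall flag + running segment counter) with finding the first and last wall by scanning from each end and counting the below-level elements in the interior slice between them.
import Mathlib
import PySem

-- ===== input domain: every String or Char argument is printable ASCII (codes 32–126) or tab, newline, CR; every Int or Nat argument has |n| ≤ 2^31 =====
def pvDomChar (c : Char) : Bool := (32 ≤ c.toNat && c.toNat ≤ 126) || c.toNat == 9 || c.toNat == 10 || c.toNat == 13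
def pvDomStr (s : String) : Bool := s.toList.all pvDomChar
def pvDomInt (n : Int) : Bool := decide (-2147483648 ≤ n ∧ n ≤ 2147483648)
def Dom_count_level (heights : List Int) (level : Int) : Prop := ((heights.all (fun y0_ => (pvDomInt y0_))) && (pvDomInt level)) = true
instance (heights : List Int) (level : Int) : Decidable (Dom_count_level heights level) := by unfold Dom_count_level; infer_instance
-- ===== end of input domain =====

-- B replaces A's single-pass wall state machine by boundary scans from both ends plus a count
-- over the interior slice (objective: alternative decomposition, same O(n) cost).

-- ===== PORT A =====
-- A's for-loop over heights with state (total, count, first_wall_found)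
def countA_loop (level : Int) : List Int → Int → Int → Bool → Int
  | [], total, _, _ => total
  | h :: t, total, count, found =>
    if level ≤ h then
      if found then countA_loop level t (total + count) 0 true
      else countA_loop level t total 0 true
    else countA_loop level t total (count + 1) found

def count_level (heights : List Int) (level : Int) : Int :=
  if level = 0 then 0
  else
    match PySem.List.max? heights (fun x => x) with
    | none => 0  -- unreachable under Pre_: Python's max([]) raises ValueError
    | some m =>
      if m < level then 0
      else countA_loop level heights 0 0 false

-- ===== PORT B =====
-- Source B's boundary scan: elements stepped over before the first h >= level ('break')
def scanBelow (level : Int) : List Int → Int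
  | [] => 0
  | h :: t => if level ≤ h then 0 else 1 + scanBelow level t

def count_level_alt (heights : List Int) (level : Int) : Int :=
  if level = 0 then 0
  else
    match PySem.List.max? heights (fun x => x) with
    | none => 0  -- unreachable under Pre_: Python's max([]) raises ValueError
    | some m =>
      if m < level then 0
      else
        let lead := scanBelow level heights
        let trail := scanBelow level heights.reverse
        ((PySem.List.slice heights (some (lead + 1))
            (some ((heights.length : Int) - 1 - trail))).countP (fun h => h < level) : Int)

-- ===== PRECONDITION & SPEC =====
-- Pre_ excludes only the inputs where the Python A raises: max([]) is a ValueError,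
-- reached exactly when heights = [] and level ≠ 0 (the 'or' short-circuits at level == 0).
def Pre_count_level (heights : List Int) (level : Int) : Prop := heights ≠ [] ∨ level = 0
instance (heights : List Int) (level : Int) : Decidable (Pre_count_level heights level) := by unfold Pre_count_level; infer_instance
def pvWitness_count_level : List Int × Int := ([1, 0, 0, 2, 0, 1], 1)

def Spec_count_level (heights : List Int) (level : Int) (out : Int) : Prop := out = count_level_alt heights level
instance (heights : List Int) (level : Int) (out : Int) : Decidable (Spec_count_level heights level out) := by unfold Spec_count_level; infer_instance

-- ===== CLAIM (what is proved, stated in full; the proofs are below) =====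
def Claim_equal_count_level : Prop := ∀ (heights : List Int) (level : Int), Dom_count_level heights level → Pre_count_level heights level → Spec_count_level heights level (count_level heights level)


-- ===== LEMMAS AND PROOFS =====

-- dropWhile of a list and of its reverse are empty together (both mean "every element passes p")
theorem dropWhile_rev_nil_iff (p : Int → Bool) (l : List Int) :
    l.reverse.dropWhile p = [] ↔ l.dropWhile p = [] := by
  simp [List.dropWhile_eq_nil_iff]

-- B's boundary scan is the length of the below-level prefix
theorem scanBelow_eq (level : Int) (l : List Int) :
    scanBelow level l = ((l.takeWhile fun h => decide (h < level)).length : Int) := by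
  induction l with
  | nil => rfl
  | cons h t ih =>
    by_cases hx : h < level
    · simp [scanBelow, not_le.mpr hx, hx, ih]
      omega
    · simp [scanBelow, not_lt.mp hx, hx]

-- A's loop after the first wall: the segment counts it still adds are the below-level
-- elements that precede the last wall of the remainder
theorem countA_true (level : Int) (l : List Int) : ∀ total count : Int,
    countA_loop level l total count true =
      total + (if l.dropWhile (fun h => decide (h < level)) = [] then 0
        else count + ((l.reverse.dropWhile (fun h => decide (h < level))).countP
              (fun h => decide (h < level)) : Int)) := by
  induction l with
  | nil => intro total count; simp [countA_loop]
  | cons h t ih =>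
    intro total count
    by_cases hl : level ≤ h
    · have hph : (fun h : Int => decide (h < level)) h = false := by simp [not_lt.2 hl]
      have hcons : (h :: t).dropWhile (fun h : Int => decide (h < level)) = h :: t := by
        simp [hph]
      rw [show countA_loop level (h :: t) total count true
            = countA_loop level t (total + count) 0 true by simp [countA_loop, hl]]
      rw [ih, hcons]
      have hrev : ((h :: t).reverse.dropWhile (fun h : Int => decide (h < level)))
          = if (t.reverse.dropWhile (fun h : Int => decide (h < level))).isEmpty
              then [h] else t.reverse.dropWhile (fun h : Int => decide (h < level)) ++ [h] := by
        simp [List.dropWhile_append, hph]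
      by_cases ht : t.dropWhile (fun h : Int => decide (h < level)) = []
      · have hrn : t.reverse.dropWhile (fun h : Int => decide (h < level)) = [] :=
          (dropWhile_rev_nil_iff _ t).mpr ht
        have : (t.reverse.dropWhile (fun h : Int => decide (h < level))).isEmpty = true := by
          simp [hrn]
        simp only [hrev, this, if_pos, if_neg (List.cons_ne_nil h t), if_pos ht]
        simp [hph]
      · have hne : t.reverse.dropWhile (fun h : Int => decide (h < level)) ≠ [] := by
          simpa [dropWhile_rev_nil_iff] using ht
        have : (t.reverse.dropWhile (fun h : Int => decide (h < level))).isEmpty = false := by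
          simpa [List.isEmpty_iff] using hne
        simp only [hrev, this, Bool.false_eq_true, if_false, if_neg (List.cons_ne_nil h t),
          if_neg ht, List.countP_append]
        simp [hph]
        ring
    · have hph : (fun h : Int => decide (h < level)) h = true := by simp [not_le.1 hl]
      have hcons : (h :: t).dropWhile (fun h : Int => decide (h < level))
          = t.dropWhile (fun h : Int => decide (h < level)) := by
        simp [hph]
      rw [show countA_loop level (h :: t) total count true
            = countA_loop level t total (count + 1) true by simp [countA_loop, hl]]
      rw [ih, hcons]
      by_cases ht : t.dropWhile (fun h : Int => decide (h < level)) = []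
      · simp [ht]
      · have hne : t.reverse.dropWhile (fun h : Int => decide (h < level)) ≠ [] := by
          simpa [dropWhile_rev_nil_iff] using ht
        have : (t.reverse.dropWhile (fun h : Int => decide (h < level))).isEmpty = false := by
          simpa [List.isEmpty_iff] using hne
        have hrev : ((h :: t).reverse.dropWhile (fun h : Int => decide (h < level)))
            = t.reverse.dropWhile (fun h : Int => decide (h < level)) ++ [h] := by
          simp [List.dropWhile_append, this]
        simp only [if_neg ht, hrev, List.countP_append]
        simp [hph]
        ring

-- A's loop before the first wall: skip the below-level prefix and the first wall itself
theorem countA_false (level : Int) (l : List Int) : ∀ count : Int,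
    countA_loop level l 0 count false =
      countA_loop level (l.dropWhile (fun h => decide (h < level))).tail 0 0 true := by
  induction l with
  | nil => intro count; rfl
  | cons h t ih =>
    intro count
    by_cases hl : level ≤ h
    · have hph : (fun h : Int => decide (h < level)) h = false := by simp [not_lt.2 hl]
      simp [countA_loop, hl, hph]
    · have hph : (fun h : Int => decide (h < level)) h = true := by simp [not_le.1 hl]
      rw [show countA_loop level (h :: t) 0 count false
            = countA_loop level t 0 (count + 1) false by simp [countA_loop, hl]]
      rw [ih]
      simp [hph]


-- B's slice count equals the value A's loop leaves: 0 with a single wall, otherwise the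
-- below-level count of the stretch before the last wall of the remainder
theorem slice_count_eq (level : Int) (l : List Int)
    (hr : l.dropWhile (fun h => decide (h < level)) ≠ []) :
    ((PySem.List.slice l (some (scanBelow level l + 1))
        (some ((l.length : Int) - 1 - scanBelow level l.reverse))).countP
        (fun h => decide (h < level)) : Int)
    = (if ((l.dropWhile (fun h => decide (h < level))).tail).dropWhile
          (fun h => decide (h < level)) = [] then 0
       else (((l.dropWhile (fun h => decide (h < level))).tail.reverse.dropWhile
            (fun h => decide (h < level))).countP (fun h => decide (h < level)) : Int)) := by
  obtain ⟨w, t, hwt⟩ := List.exists_cons_of_ne_nil hr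
  have hpw : (fun h : Int => decide (h < level)) w = false := by
    have h1 := List.head_dropWhile_not (fun h : Int => decide (h < level)) hr
    have h2 : (l.dropWhile (fun h : Int => decide (h < level))).head hr = w := by simp [hwt]
    rw [h2] at h1
    simpa using h1
  have hsplit : l = l.takeWhile (fun h => decide (h < level)) ++ w :: t := by
    conv_lhs => rw [← List.takeWhile_append_dropWhile
      (p := fun h : Int => decide (h < level)) (l := l), hwt]
  have hlen : l.length = (l.takeWhile (fun h : Int => decide (h < level))).length + 1 + t.length := by
    have := congrArg List.length hsplit
    simp at this
    omega
  have hlr : l.reverse = t.reverse ++ w :: (l.takeWhile (fun h : Int => decide (h < level))).reverse := by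
    conv_lhs => rw [hsplit]
    simp
  rw [scanBelow_eq, scanBelow_eq, hwt]
  simp only [List.tail_cons]
  by_cases ht : t.dropWhile (fun h => decide (h < level)) = []
  · -- single wall: the slice is empty
    have hallrev : t.reverse.takeWhile (fun h : Int => decide (h < level)) = t.reverse := by
      rw [List.takeWhile_eq_self_iff]
      intro x hx
      exact (List.dropWhile_eq_nil_iff.mp ht) x (List.mem_reverse.mp hx)
    have htw : (l.reverse.takeWhile (fun h : Int => decide (h < level))).length = t.length := by
      rw [hlr, List.takeWhile_append, if_pos (by rw [hallrev])]
      simp [hpw]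
    have hstop : (l.length : Int) - 1 - ((l.reverse.takeWhile (fun h : Int => decide (h < level))).length : Int)
        = ((l.takeWhile (fun h : Int => decide (h < level))).length : Int) := by
      rw [htw]
      omega
    rw [hstop, PySem.List.slice_toNat l (by omega) (by omega)]
    have h0 : ((l.takeWhile (fun h : Int => decide (h < level))).length : Int).toNat
        - (((l.takeWhile (fun h : Int => decide (h < level))).length : Int) + 1).toNat = 0 := by
      omega
    simp [ht]
  · -- at least two walls: the slice is the stretch before the last wall, reversed
    have hne : t.reverse.dropWhile (fun h : Int => decide (h < level)) ≠ [] := by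
      simpa [dropWhile_rev_nil_iff] using ht
    obtain ⟨w2, s, hW⟩ := List.exists_cons_of_ne_nil hne
    have hpw2 : (fun h : Int => decide (h < level)) w2 = false := by
      have h1 := List.head_dropWhile_not (fun h : Int => decide (h < level)) hne
      have h2 : (t.reverse.dropWhile (fun h : Int => decide (h < level))).head hne = w2 := by
        simp [hW]
      rw [h2] at h1
      simpa using h1
    have htr : t.reverse = t.reverse.takeWhile (fun h : Int => decide (h < level)) ++ w2 :: s := by
      conv_lhs => rw [← List.takeWhile_append_dropWhile
        (p := fun h : Int => decide (h < level)) (l := t.reverse), hW]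
    have ht_eq : t = s.reverse ++ w2 :: (t.reverse.takeWhile (fun h : Int => decide (h < level))).reverse := by
      have := congrArg List.reverse htr
      simpa using this
    have hlt : t.length = s.length + 1 + (t.reverse.takeWhile (fun h : Int => decide (h < level))).length := by
      have := congrArg List.length ht_eq
      simp at this
      omega
    have htw : (l.reverse.takeWhile (fun h : Int => decide (h < level))).length
        = (t.reverse.takeWhile (fun h : Int => decide (h < level))).length := by
      rw [hlr, List.takeWhile_append, if_neg (by simp; omega)]
    have hstop : (l.length : Int) - 1 - ((l.reverse.takeWhile (fun h : Int => decide (h < level))).length : Int)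
        = ((l.takeWhile (fun h : Int => decide (h < level))).length : Int) + 1 + s.length := by
      rw [htw]
      omega
    rw [hstop, PySem.List.slice_toNat l (by omega) (by omega)]
    obtain ⟨tw, htwd⟩ : ∃ x, x = l.takeWhile (fun h : Int => decide (h < level)) := ⟨_, rfl⟩
    rw [← htwd] at hsplit hlen ⊢
    have hdrop : l.drop ((tw.length : Int) + 1).toNat = t := by
      rw [show ((tw.length : Int) + 1).toNat = tw.length + 1 from by omega]
      conv_lhs => rw [hsplit]
      simp
    have htake : (((tw.length : Int) + 1 + s.length).toNat
        - ((tw.length : Int) + 1).toNat) = s.length := by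
      omega
    rw [hdrop, htake]
    have hts : t.take s.length = s.reverse := by
      conv_lhs => rw [ht_eq, show s.length = s.reverse.length by simp]
      exact List.take_left
    rw [hts, if_neg ht, hW]
    simp [List.countP_reverse, hpw2]

-- ===== VERDICT (by name: the statement is the Claim_ definition above) =====
theorem count_level_spec : Claim_equal_count_level := by
  intro heights level _ _
  unfold Spec_count_level count_level count_level_alt
  by_cases h0 : level = 0
  · simp [h0]
  · simp only [if_neg h0]
    cases hm : PySem.List.max? heights (fun x => x) with
    | none => rfl
    | some m =>
      by_cases hml : m < level
      · simp [hml]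
      · simp only [if_neg hml]
        have hr : heights.dropWhile (fun h => decide (h < level)) ≠ [] := by
          intro hnil
          have hall := List.dropWhile_eq_nil_iff.mp hnil
          have hmem := PySem.List.max?_mem hm
          have := hall m hmem
          simp at this
          omega
        rw [countA_false, countA_true, slice_count_eq level heights hr]
        simp
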